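-- pv_equiv track=rewrite | github.com/scottshowers/xlr8 | utils/features/comparison_engine.py | _detect_join_keys
-- ===== SOURCE A (Python) =====
-- from typing import List, Dict, Any, Optional, Set
--
-- def _detect_join_keys(cols_a: List[str], cols_b: List[str]) -> List[str]:
--     """
--     Auto-detect likely join keys from common columns.
--
--     Priority:
--     1. Columns with 'id', 'code', 'key', 'number' in name
--     2. Columns with 'name' in name
--     3. First common column as fallback
--     """
--     common = set(cols_a) & set(cols_b)
--
--     # Remove internal columns
--     common = {c for c in common if not c.startswith('_')}
--
--     if not common:
--         return []
--
--     # Priority keywords for join keys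
--     key_patterns = ['_id', 'id_', 'code', 'key', 'number', 'num', 'ein', 'ssn', 'fein']
--     name_patterns = ['name', 'description', 'desc']
--
--     join_keys = []
--
--     # First pass: ID/code columns
--     for col in common:
--         col_lower = col.lower()
--         if any(p in col_lower for p in key_patterns):
--             join_keys.append(col)
--
--     # Second pass: name columns (if no ID cols found)
--     if not join_keys:
--         for col in common:
--             col_lower = col.lower()
--             if any(p in col_lower for p in name_patterns):
--                 join_keys.append(col)
--
--     # Fallback: first common column
--     if not join_keys:
--         join_keys = [sorted(common)[0]]
--
--     return join_keys
-- ===== SOURCE B (Python) =====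
-- from typing import List
--
-- _KEY_PATTERNS = ('_id', 'id_', 'code', 'key', 'number', 'num', 'ein', 'ssn', 'fein')
-- _NAME_PATTERNS = ('name', 'description', 'desc')
--
--
-- def _tier(col: str) -> int:
--     cl = col.lower()
--     if any(p in cl for p in _KEY_PATTERNS):
--         return 0
--     if any(p in cl for p in _NAME_PATTERNS):
--         return 1
--     return 2
--
--
-- def _detect_join_keys(cols_a: List[str], cols_b: List[str]) -> List[str]:
--     # Single pass over cols_a: dedupe on the fly, keep a running minimum for the
--     # fallback, and a tournament of the best tier (0 = key-like, 1 = name-like).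
--     b_set = set(cols_b)
--     seen = set()
--     best = 3
--     hits: List[str] = []
--     min_col = None
--     for col in cols_a:
--         if col in seen or col not in b_set or col.startswith('_'):
--             continue
--         seen.add(col)
--         if min_col is None or col < min_col:
--             min_col = col
--         t = _tier(col)
--         if t < 2:
--             if t < best:
--                 best = t
--                 hits = [col]
--             elif t == best:
--                 hits.append(col)
--     if min_col is None:
--         return []
--     return hits if hits else [min_col]
-- ===== Notes on version B (the rewrite author's own statement) =====
-- stated objective: alternative
-- what changed: B replaces A's build-the-common-set-then-scan-it-twice structure by a single pass over cols_a that dedups on the fly with a seen-set, classifies each common column once into a tier (key-like / name-like / other), keeps only the best-tier bucket via a tournament, and tracks a running minimum instead of sorting for the fallback.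
import Mathlib
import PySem

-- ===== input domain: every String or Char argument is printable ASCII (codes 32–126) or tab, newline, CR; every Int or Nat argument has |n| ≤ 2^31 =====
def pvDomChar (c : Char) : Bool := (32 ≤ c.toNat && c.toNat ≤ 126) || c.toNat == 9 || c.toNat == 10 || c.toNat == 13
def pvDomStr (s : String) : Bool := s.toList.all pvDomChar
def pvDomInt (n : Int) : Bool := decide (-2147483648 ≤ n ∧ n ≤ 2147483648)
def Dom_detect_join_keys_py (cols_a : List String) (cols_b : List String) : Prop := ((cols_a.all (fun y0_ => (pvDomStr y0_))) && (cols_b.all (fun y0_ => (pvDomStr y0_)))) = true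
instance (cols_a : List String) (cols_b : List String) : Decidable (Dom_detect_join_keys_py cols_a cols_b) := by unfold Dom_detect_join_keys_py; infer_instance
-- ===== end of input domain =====

-- B replaces A's two conditional scans over the common set by a single pass over cols_a
-- (dedup on the fly, a best-tier tournament, a running minimum instead of sorting);
-- objective: alternative. Output LIST ORDER follows the port's insertion-order set model;
-- the Python outputs are compared as sets (the task's ret_compare), matching Python's
-- unspecified set-iteration order.

def pvKeyPatterns : List String := ["_id", "id_", "code", "key", "number", "num", "ein", "ssn", "fein"]
def pvNamePatterns : List String := ["name", "description", "desc"]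

-- ===== PORT A =====
def detect_join_keys_py (cols_a : List String) (cols_b : List String) : List String :=
  let common0 : PySem.Set String := PySem.Set.inter (PySem.Set.ofList cols_a) (PySem.Set.ofList cols_b)
  let common : PySem.Set String := PySem.Set.ofList (common0.filter (fun c => !(PySem.Str.startswith c "_")))
  if common.isEmpty then []
  else
    let join_keys : List String := common.foldl (fun acc col =>
        let col_lower := PySem.Str.lower col
        if pvKeyPatterns.any (fun p => PySem.Str.isIn p col_lower) then acc ++ [col] else acc) []
    let join_keys2 : List String :=
      if join_keys.isEmpty then
        common.foldl (fun acc col =>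
          let col_lower := PySem.Str.lower col
          if pvNamePatterns.any (fun p => PySem.Str.isIn p col_lower) then acc ++ [col] else acc) []
      else join_keys
    if join_keys2.isEmpty then [(PySem.List.sorted common (fun x => x) false).headD ""]
    else join_keys2

-- ===== PORT B =====
def pvTier (col : String) : Nat :=
  let cl := PySem.Str.lower col
  if pvKeyPatterns.any (fun p => PySem.Str.isIn p cl) then 0
  else if pvNamePatterns.any (fun p => PySem.Str.isIn p cl) then 1
  else 2

-- the body of B's single loop (one step of the Python for-loop)
def pvLoopB (b_set : PySem.Set String) (st : PySem.Set String × Nat × List String × Option String)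
    (col : String) : PySem.Set String × Nat × List String × Option String :=
  let (seen, best, hits, min_col) := st
  if PySem.Set.contains seen col || !(PySem.Set.contains b_set col) || PySem.Str.startswith col "_" then
    (seen, best, hits, min_col)
  else
    let seen := PySem.Set.add seen col
    let min_col := match min_col with
      | none => some col
      | some m => if col < m then some col else some m
    let t := pvTier col
    if t < 2 then
      if t < best then (seen, t, [col], min_col)
      else if t == best then (seen, best, hits ++ [col], min_col)
      else (seen, best, hits, min_col)
    else (seen, best, hits, min_col)

def detect_join_keys_py_alt (cols_a : List String) (cols_b : List String) : List String :=
  let b_set : PySem.Set String := PySem.Set.ofList cols_b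
  let st := cols_a.foldl (pvLoopB b_set)
    ((PySem.Set.empty : PySem.Set String), 3, ([] : List String), (none : Option String))
  match st.2.2.2 with
  | none => []
  | some m => if st.2.2.1.isEmpty then [m] else st.2.2.1

-- ===== PRECONDITION & SPEC =====
def Spec_detect_join_keys_py (cols_a : List String) (cols_b : List String) (out : List String) : Prop := out = detect_join_keys_py_alt cols_a cols_b
instance (cols_a : List String) (cols_b : List String) (out : List String) : Decidable (Spec_detect_join_keys_py cols_a cols_b out) := by unfold Spec_detect_join_keys_py; infer_instance

-- ===== CLAIM (what is proved, stated in full; the proofs are below) =====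
def Claim_equal_detect_join_keys_py : Prop := ∀ (cols_a : List String) (cols_b : List String), Dom_detect_join_keys_py cols_a cols_b → Spec_detect_join_keys_py cols_a cols_b (detect_join_keys_py cols_a cols_b)

-- ===== LEMMAS AND PROOFS =====

-- the per-column admission test (in cols_b, not '_'-prefixed)
def pvValid (cols_b : List String) (col : String) : Bool :=
  PySem.Set.contains (PySem.Set.ofList cols_b) col && !(PySem.Str.startswith col "_")

-- key / name matching as booleans
def pvKB (col : String) : Bool := pvKeyPatterns.any (fun p => PySem.Str.isIn p (PySem.Str.lower col))
def pvNB (col : String) : Bool := pvNamePatterns.any (fun p => PySem.Str.isIn p (PySem.Str.lower col))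

-- the deduped, filtered traversal order B realizes with its `seen` set
def pvSelect (cols_b : List String) : List String → PySem.Set String → List String
  | [], _ => []
  | c :: l, seen =>
      if PySem.Set.contains seen c || !(PySem.Set.contains (PySem.Set.ofList cols_b) c) || PySem.Str.startswith c "_" then
        pvSelect cols_b l seen
      else c :: pvSelect cols_b l (PySem.Set.add seen c)

-- B's per-column state update once the seen/validity guard has been factored out
def pvStep (st : Nat × List String × Option String) (col : String) : Nat × List String × Option String :=
  let (best, hits, min_col) := st
  let min_col := match min_col with
    | none => some col
    | some m => if col < m then some col else some m
  let t := pvTier col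
  if t < 2 then
    if t < best then (t, [col], min_col)
    else if t == best then (best, hits ++ [col], min_col)
    else (best, hits, min_col)
  else (best, hits, min_col)

-- closed forms of the fold state
def pvBestF (L : List String) : Nat := if L.any pvKB then 0 else if L.any pvNB then 1 else 3
def pvHitsF (L : List String) : List String := if L.any pvKB then L.filter pvKB else L.filter pvNB
def pvMin (t : List String) (x : String) : String := t.foldl (fun m c => if c < m then c else m) x
def pvMincF (L : List String) : Option String := match L with
  | [] => none
  | x :: t => some (pvMin t x)

theorem pv_loopB_guard (cols_b : List String) (seen : PySem.Set String) (best : Nat)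
    (hits : List String) (minc : Option String) (col : String)
    (hg : (PySem.Set.contains seen col || !(PySem.Set.contains (PySem.Set.ofList cols_b) col) || PySem.Str.startswith col "_") = true) :
    pvLoopB (PySem.Set.ofList cols_b) (seen, best, hits, minc) col = (seen, best, hits, minc) := by
  unfold pvLoopB
  dsimp only
  rw [if_pos hg]

theorem pv_loopB_step (cols_b : List String) (seen : PySem.Set String) (best : Nat)
    (hits : List String) (minc : Option String) (col : String)
    (hg : (PySem.Set.contains seen col || !(PySem.Set.contains (PySem.Set.ofList cols_b) col) || PySem.Str.startswith col "_") = false) :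
    pvLoopB (PySem.Set.ofList cols_b) (seen, best, hits, minc) col
      = (PySem.Set.add seen col, pvStep (best, hits, minc) col) := by
  unfold pvLoopB pvStep
  dsimp only
  rw [if_neg (by rw [hg]; decide)]
  rcases minc with _ | m <;> split_ifs <;> rfl

set_option maxHeartbeats 1000000 in
theorem pv_fold_eq_select (cols_b : List String) (l : List String) :
    ∀ (seen : PySem.Set String) (st : Nat × List String × Option String),
      (l.foldl (pvLoopB (PySem.Set.ofList cols_b)) (seen, st)).2
        = (pvSelect cols_b l seen).foldl pvStep st := by
  induction l with
  | nil => intro seen st; rfl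
  | cons c l ih =>
      intro seen st
      obtain ⟨best, hits, minc⟩ := st
      by_cases hg : (PySem.Set.contains seen c || !(PySem.Set.contains (PySem.Set.ofList cols_b) c) || PySem.Str.startswith c "_") = true
      · simp only [List.foldl_cons, pvSelect, hg, if_true]
        rw [pv_loopB_guard cols_b seen best hits minc c hg]
        exact ih seen (best, hits, minc)
      · simp only [Bool.not_eq_true] at hg
        simp only [List.foldl_cons, pvSelect, hg]
        rw [pv_loopB_step cols_b seen best hits minc c hg]
        exact ih (PySem.Set.add seen c) (pvStep (best, hits, minc) c)

theorem pv_select_eq_filter (cols_b : List String) (l : List String) :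
    ∀ (seen : PySem.Set String),
      pvSelect cols_b l seen
        = ((PySem.Set.update seen l).drop seen.length).filter (pvValid cols_b) := by
  induction l with
  | nil => intro seen; simp [pvSelect, PySem.Set.update]
  | cons c l ih =>
      intro seen
      have hupd : PySem.Set.update seen (c :: l) = PySem.Set.update (PySem.Set.add seen c) l := rfl
      by_cases hc : PySem.Set.contains seen c = true
      · have hadd : PySem.Set.add seen c = seen := by
          simp only [PySem.Set.add, hc, if_true]
        simp only [pvSelect, hc, Bool.true_or, if_true]
        rw [ih seen, hupd, hadd]
      · have hcf : PySem.Set.contains seen c = false := by simpa using hc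
        have hadd : PySem.Set.add seen c = seen ++ [c] := by
          simp only [PySem.Set.add, hcf, Bool.false_eq_true, if_false]
        have hlen : (seen ++ [c]).length = seen.length + 1 := by simp
        by_cases hv : pvValid cols_b c = true
        · have hv' := hv
          simp only [pvValid, Bool.and_eq_true] at hv'
          obtain ⟨h1, h2⟩ := hv'
          have hsw : PySem.Str.startswith c "_" = false := by simpa using h2
          have hns : c ∉ seen := by intro hm; simp [hm] at hcf
          have hmb : c ∈ cols_b := by
            have := List.mem_of_elem_eq_true h1
            simpa [PySem.Set.mem_ofList] using this
          have hg : (PySem.Set.contains seen c || !(PySem.Set.contains (PySem.Set.ofList cols_b) c) || PySem.Str.startswith c "_") = false := by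
            simp
            exact ⟨⟨hns, hmb⟩, by simpa using hsw⟩
          simp only [pvSelect, hg, Bool.false_eq_true, if_false]
          rw [ih (PySem.Set.add seen c), hupd, hadd]
          rw [PySem.Set.update_eq_append_filter, List.drop_left, List.append_assoc, List.drop_left]
          simp [hv]
        · have hvf : pvValid cols_b c = false := by simpa using hv
          have hg : (PySem.Set.contains seen c || !(PySem.Set.contains (PySem.Set.ofList cols_b) c) || PySem.Str.startswith c "_") = true := by
            cases hb : PySem.Set.contains (PySem.Set.ofList cols_b) c with
            | true =>
                cases hs : PySem.Str.startswith c "_" with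
                | true => simp
                | false =>
                    have hmb : c ∈ cols_b := by
                      have := List.mem_of_elem_eq_true hb
                      simpa [PySem.Set.mem_ofList] using this
                    exact absurd hvf (by simp [pvValid, hmb]; simpa using hs)
            | false => simp
          simp only [pvSelect, hg, if_true]
          rw [ih seen, hupd, hadd]
          rw [PySem.Set.update_eq_append_filter, PySem.Set.update_eq_append_filter]
          rw [List.drop_left, List.append_assoc, List.drop_left]
          simp only [List.singleton_append, List.filter_cons, hvf, Bool.false_eq_true, if_false]
          rw [List.filter_filter, List.filter_filter]
          apply List.filter_congr
          intro y hy
          by_cases hyc : y = c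
          · subst hyc
            simp [hvf]
          · have : PySem.Set.contains (seen ++ [c]) y = PySem.Set.contains seen y := by
              simp [List.mem_append, hyc]
            rw [this]


theorem pvTier_eq (c : String) : pvTier c = if pvKB c then 0 else if pvNB c then 1 else 2 := rfl

theorem pv_fold_closed (L : List String) :
    L.foldl pvStep (3, ([] : List String), (none : Option String)) = (pvBestF L, pvHitsF L, pvMincF L) := by
  induction L using List.reverseRecOn with
  | nil => rfl
  | append_singleton l c ih =>
      rw [List.foldl_append, ih]
      have hminc : (match pvMincF l with
          | none => some c
          | some m => if c < m then some c else some m) = pvMincF (l ++ [c]) := by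
        cases l with
        | nil => rfl
        | cons x t =>
            simp [pvMincF, pvMin, List.foldl_append, apply_ite]
            split
            · rename_i hlt
              intro h
              exact absurd (lt_of_lt_of_le hlt h) (lt_irrefl _)
            · rename_i hnlt
              intro h
              exact absurd h hnlt
      simp only [List.foldl_cons, List.foldl_nil]
      unfold pvStep
      dsimp only
      rw [hminc]
      rcases hk : pvKB c <;> rcases hn : pvNB c <;> rcases hak : l.any pvKB <;> rcases han : l.any pvNB <;>
        simp [pvBestF, pvHitsF, pvTier_eq, hk, hn, hak, han, List.any_append, List.filter_append] <;>
        simp_all [List.any_eq_false]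

theorem pv_min_least (t : List String) : ∀ (x : String), pvMin t x ∈ x :: t ∧ ∀ y ∈ x :: t, pvMin t x ≤ y := by
  induction t with
  | nil => intro x; simp [pvMin]
  | cons c t ih =>
      intro x
      by_cases hcx : c < x
      · have hcx2 : c.toList < x.toList := String.lt_iff_toList_lt.mp hcx
        have heq : pvMin (c :: t) x = pvMin t c := by simp [pvMin, hcx2]
        obtain ⟨hmem, hle⟩ := ih c
        rw [heq]
        refine ⟨List.mem_cons_of_mem _ hmem, ?_⟩
        intro y hy
        rcases List.mem_cons.mp hy with rfl | hy'
        · exact le_trans (hle c (List.mem_cons_self ..)) (le_of_lt hcx)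
        · exact hle y hy'
      · have hcx2 : ¬ c.toList < x.toList := fun h => hcx (String.lt_iff_toList_lt.mpr h)
        have heq : pvMin (c :: t) x = pvMin t x := by simp [pvMin, hcx2]
        obtain ⟨hmem, hle⟩ := ih x
        rw [heq]
        constructor
        · rcases List.mem_cons.mp hmem with h | h
          · exact List.mem_cons.mpr (Or.inl h)
          · exact List.mem_cons_of_mem _ (List.mem_cons_of_mem _ h)
        · intro y hy
          rcases List.mem_cons.mp hy with rfl | hy'
          · exact hle y (List.mem_cons_self ..)
          · rcases List.mem_cons.mp hy' with rfl | hy''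
            · exact le_trans (hle x (List.mem_cons_self ..)) (not_lt.mp hcx)
            · exact hle y (List.mem_cons_of_mem _ hy'')

theorem pv_sorted_head_eq_min (x : String) (t : List String) :
    (PySem.List.sorted (x :: t) (fun y => y) false).headD "" = pvMin t x := by
  cases hS : PySem.List.sorted (x :: t) (fun y => y) false with
  | nil => exact absurd ((PySem.List.sorted_eq_nil_iff _ _ _).mp hS) (by simp)
  | cons m s =>
      have hmle : ∀ y ∈ x :: t, m ≤ y := PySem.List.key_head_sorted_le _ _ hS
      have hmmem : m ∈ x :: t := by
        have : m ∈ PySem.List.sorted (x :: t) (fun y => y) false := by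
          rw [hS]; exact List.mem_cons_self ..
        exact (PySem.List.mem_sorted _ _ _ _).mp this
      obtain ⟨hvmem, hvle⟩ := pv_min_least t x
      simpa using le_antisymm (hmle _ hvmem) (hvle _ hmmem)

theorem pv_common_eq (cols_a cols_b : List String) :
    PySem.Set.ofList ((PySem.Set.inter (PySem.Set.ofList cols_a) (PySem.Set.ofList cols_b)).filter
        (fun c => !(PySem.Str.startswith c "_")))
      = (PySem.Set.ofList cols_a).filter (pvValid cols_b) := by
  have hint : PySem.Set.inter (PySem.Set.ofList cols_a) (PySem.Set.ofList cols_b)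
      = (PySem.Set.ofList cols_a).filter (fun c => PySem.Set.contains (PySem.Set.ofList cols_b) c) := by
    simp [PySem.Set.inter]
  rw [hint, List.filter_filter]
  have hnd : ((PySem.Set.ofList cols_a).filter
      (fun a => (!PySem.Str.startswith a "_") && PySem.Set.contains (PySem.Set.ofList cols_b) a)).Nodup :=
    (PySem.Set.nodup_ofList cols_a).filter _
  rw [PySem.Set.ofList_eq_self_of_nodup _ hnd]
  apply List.filter_congr
  intro y _
  simp [pvValid, Bool.and_comm]

-- ===== VERDICT (by name: the statement is the Claim_ definition above) =====
theorem pv_any_of_filter_ne_nil {p : String → Bool} {l : List String} (h : l.filter p ≠ []) :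
    l.any p = true := by
  cases hA : l.any p
  · exact absurd (List.filter_eq_nil_iff.mpr
      (fun a ha => by simpa using (List.any_eq_false.mp hA) a ha)) h
  · rfl

theorem detect_join_keys_py_spec : Claim_equal_detect_join_keys_py := by
  intro cols_a cols_b _
  unfold Spec_detect_join_keys_py detect_join_keys_py detect_join_keys_py_alt
  dsimp only
  rw [pv_common_eq]
  have hbK : (fun (acc : List String) col =>
      let col_lower := PySem.Str.lower col
      if pvKeyPatterns.any (fun p => PySem.Str.isIn p col_lower) then acc ++ [col] else acc)
      = (fun (acc : List String) col => if pvKB col = true then acc ++ [col] else acc) := rfl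
  have hbN : (fun (acc : List String) col =>
      let col_lower := PySem.Str.lower col
      if pvNamePatterns.any (fun p => PySem.Str.isIn p col_lower) then acc ++ [col] else acc)
      = (fun (acc : List String) col => if pvNB col = true then acc ++ [col] else acc) := rfl
  rw [hbK, hbN, PySem.List.foldl_append_if_eq_filter, PySem.List.foldl_append_if_eq_filter]
  have hchain : (cols_a.foldl (pvLoopB (PySem.Set.ofList cols_b))
        ((PySem.Set.empty : PySem.Set String), 3, ([] : List String), (none : Option String))).2
      = (pvBestF (List.filter (pvValid cols_b) (PySem.Set.ofList cols_a)),
         pvHitsF (List.filter (pvValid cols_b) (PySem.Set.ofList cols_a)),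
         pvMincF (List.filter (pvValid cols_b) (PySem.Set.ofList cols_a))) := by
    rw [pv_fold_eq_select, pv_select_eq_filter]
    simp only [PySem.Set.empty]
    rw [PySem.Set.update_nil_left]
    simp only [List.length_nil, List.drop_zero]
    exact pv_fold_closed _
  rw [hchain]
  dsimp only
  cases hL : List.filter (pvValid cols_b) (PySem.Set.ofList cols_a) with
  | nil => simp [pvMincF]
  | cons x t =>
      simp only [List.nil_append, List.isEmpty_cons, Bool.false_eq_true, if_false]
      by_cases hK : (x :: t).filter pvKB = []
      · have haK : (x :: t).any pvKB = false := by
          rw [List.any_eq_false]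
          intro a ha
          have := List.filter_eq_nil_iff.mp hK a ha
          simpa using this
        by_cases hN : (x :: t).filter pvNB = []
        · have haN : (x :: t).any pvNB = false := by
            rw [List.any_eq_false]
            intro a ha
            have := List.filter_eq_nil_iff.mp hN a ha
            simpa using this
          simp only [hK, List.isEmpty_nil, if_true, hN, pvHitsF, pvMincF, haK,
            Bool.false_eq_true, if_false]
          exact congrArg (fun z => [z]) (pv_sorted_head_eq_min x t)
        · have haN : (x :: t).any pvNB = true := pv_any_of_filter_ne_nil hN
          simp [hK, pvHitsF, pvMincF, haK, List.isEmpty_iff, hN]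
      · have haK : (x :: t).any pvKB = true := pv_any_of_filter_ne_nil hK
        simp [pvHitsF, pvMincF, haK, List.isEmpty_iff, hK]
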